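-- pv_equiv track=rewrite | github.com/joshanashakya/dissertation | workspace/dataset/java-python/GeeksForGeeks/3108/A/2.py | findlargestAfterDel
-- ===== SOURCE A (Python) =====
-- def findlargestAfterDel(arr, m, dell, n):
--
--     # Hash Map of the numbers
--     # to be deleted
--     mp = dict()
--     for i in range(n):
--
--         # Increment the count of del[i]
--         if dell[i] in mp.keys():
--             mp[dell[i]] += 1
--         else:
--             mp[dell[i]] = 1
--
--     # Initializing the largestElement
--     largestElement = -10**9
--
--     for i in range(m):
--
--         # Search if the element is present
--         if (arr[i] in mp.keys()):
--
--             # Decrement its frequency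
--             mp[arr[i]] -= 1
--
--             # If the frequency becomes 0,
--             # erase it from the map
--             if (mp[arr[i]] == 0):
--                 mp.pop(arr[i])
--
--         # Else compare it largestElement
--         else:
--             largestElement = max(largestElement,
--                                          arr[i])
--
--     return largestElement
-- ===== SOURCE B (Python) =====
-- def findlargestAfterDel(arr, m, dell, n):
--     # Tabulate frequencies of the first m arr elements and the first n dell
--     # elements, then take the max over values whose arr-count exceeds the
--     # deletion count (multiset difference), defaulting to -10**9.
--     ca = {}
--     for i in range(m):
--         ca[arr[i]] = ca.get(arr[i], 0) + 1
--     cd = {}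
--     for i in range(n):
--         cd[dell[i]] = cd.get(dell[i], 0) + 1
--     largestElement = -10**9
--     for v, c in ca.items():
--         if c > cd.get(v, 0):
--             largestElement = max(largestElement, v)
--     return largestElement
-- ===== Notes on version B (the rewrite author's own statement) =====
-- stated objective: alternative
-- what changed: Replaces A's decrement-and-erase consumption scan (a mutable deletion map updated while scanning arr) with two independent frequency tables built once and a max over the multiset difference (values whose arr-count exceeds their deletion count).
import Mathlib
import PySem

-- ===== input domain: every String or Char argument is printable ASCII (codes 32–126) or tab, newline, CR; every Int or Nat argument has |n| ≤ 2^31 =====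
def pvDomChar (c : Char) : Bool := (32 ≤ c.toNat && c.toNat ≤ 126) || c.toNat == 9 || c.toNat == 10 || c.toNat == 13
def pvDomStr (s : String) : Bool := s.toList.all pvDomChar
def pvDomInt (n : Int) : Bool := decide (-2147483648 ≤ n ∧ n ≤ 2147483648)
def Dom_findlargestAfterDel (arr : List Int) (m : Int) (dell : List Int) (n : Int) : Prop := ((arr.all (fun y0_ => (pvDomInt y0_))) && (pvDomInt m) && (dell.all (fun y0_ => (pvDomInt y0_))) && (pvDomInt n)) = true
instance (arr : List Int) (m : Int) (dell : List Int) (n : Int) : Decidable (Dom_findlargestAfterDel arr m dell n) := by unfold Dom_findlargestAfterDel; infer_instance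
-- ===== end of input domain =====

-- B replaces A's decrement-and-erase consumption scan with two frequency tables
-- and a max over their multiset difference; same asymptotic cost ("alternative").

-- ===== PORT A =====
def findlargestAfterDel (arr : List Int) (m : Int) (dell : List Int) (n : Int) : Int :=
  let mp : PySem.Dict Int Int :=
    (PySem.List.pyRange 0 n).foldl (fun mp i =>
      let d := PySem.List.pyGetD dell i 0
      if mp.contains d then mp.insert d (mp.getD d 0 + 1) else mp.insert d 1)
      PySem.Dict.empty
  let st : PySem.Dict Int Int × Int :=
    (PySem.List.pyRange 0 m).foldl (fun st i =>
      let a := PySem.List.pyGetD arr i 0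
      if st.1.contains a then
        let mp2 := st.1.insert a (st.1.getD a 0 - 1)
        if mp2.getD a 0 == 0 then (mp2.erase a, st.2) else (mp2, st.2)
      else (st.1, max st.2 a))
      (mp, -(10 ^ 9))
  st.2

-- ===== PORT B =====
def findlargestAfterDel_alt (arr : List Int) (m : Int) (dell : List Int) (n : Int) : Int :=
  let ca : PySem.Dict Int Int :=
    (PySem.List.pyRange 0 m).foldl (fun d i =>
      let x := PySem.List.pyGetD arr i 0
      d.insert x (d.getD x 0 + 1)) PySem.Dict.empty
  let cd : PySem.Dict Int Int :=
    (PySem.List.pyRange 0 n).foldl (fun d i =>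
      let x := PySem.List.pyGetD dell i 0
      d.insert x (d.getD x 0 + 1)) PySem.Dict.empty
  ca.items.foldl (fun best p => if cd.getD p.1 0 < p.2 then max best p.1 else best) (-(10 ^ 9))

-- ===== PRECONDITION & SPEC =====
-- Pre_ excludes exactly the inputs on which Python A raises IndexError: m > len(arr) or n > len(dell).
def Pre_findlargestAfterDel (arr : List Int) (m : Int) (dell : List Int) (n : Int) : Prop :=
  m ≤ (arr.length : Int) ∧ n ≤ (dell.length : Int)
instance (arr : List Int) (m : Int) (dell : List Int) (n : Int) : Decidable (Pre_findlargestAfterDel arr m dell n) := by unfold Pre_findlargestAfterDel; infer_instance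

def pvWitness_findlargestAfterDel : List Int × Int × List Int × Int := ([1, 2, 2, 5, 3], 5, [2, 5], 2)

def Spec_findlargestAfterDel (arr : List Int) (m : Int) (dell : List Int) (n : Int) (out : Int) : Prop := out = findlargestAfterDel_alt arr m dell n
instance (arr : List Int) (m : Int) (dell : List Int) (n : Int) (out : Int) : Decidable (Spec_findlargestAfterDel arr m dell n out) := by unfold Spec_findlargestAfterDel; infer_instance

-- ===== CLAIM (what is proved, stated in full; the proofs are below) =====
def Claim_equal_findlargestAfterDel : Prop := ∀ (arr : List Int) (m : Int) (dell : List Int) (n : Int), Dom_findlargestAfterDel arr m dell n → Pre_findlargestAfterDel arr m dell n → Spec_findlargestAfterDel arr m dell n (findlargestAfterDel arr m dell n)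

-- ===== LEMMAS AND PROOFS =====

-- Loop bodies of the two ports, named for the proofs (each is defeq to the inline lambda of its port).
def pvDStep (mp : PySem.Dict Int Int) (d : Int) : PySem.Dict Int Int :=
  if mp.contains d then mp.insert d (mp.getD d 0 + 1) else mp.insert d 1

def pvAStep (st : PySem.Dict Int Int × Int) (a : Int) : PySem.Dict Int Int × Int :=
  if st.1.contains a then
    let mp2 := st.1.insert a (st.1.getD a 0 - 1)
    if mp2.getD a 0 == 0 then (mp2.erase a, st.2) else (mp2, st.2)
  else (st.1, max st.2 a)

def pvCStep (d : PySem.Dict Int Int) (x : Int) : PySem.Dict Int Int := d.insert x (d.getD x 0 + 1)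

-- Functional mirror of A's consumption scan: f v = remaining deletions for v.
def pvScanF : List Int → (Int → Int) → Int → Int
  | [], _, L => L
  | x :: xs, f, L =>
    if f x ≠ 0 then pvScanF xs (fun v => if v = x then f x - 1 else f v) L
    else pvScanF xs f (max L x)

-- The survivors (elements compared against the running max) of that scan.
def pvSurv : List Int → (Int → Int) → List Int
  | [], _ => []
  | x :: xs, f =>
    if f x ≠ 0 then pvSurv xs (fun v => if v = x then f x - 1 else f v)
    else x :: pvSurv xs f

-- A fold over range(m) reading xs[i] is a fold over the prefix take m (m ≤ len xs).
theorem pv_foldl_pyRange_take {α β : Type} (xs : List α) (d : α) (f : β → α → β) (init : β)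
    (m : Int) (hm : m ≤ (xs.length : Int)) :
    List.foldl (fun acc j => f acc (PySem.List.pyGetD xs j d)) init (PySem.List.pyRange 0 m)
      = List.foldl f init (xs.take m.toNat) := by
  by_cases h0 : 0 ≤ m
  · have hmn : m.toNat ≤ xs.length := by omega
    have hlen : PySem.List.len (xs.take m.toNat) = m := by
      simp only [PySem.List.len, List.length_take]
      omega
    have hmain := PySem.List.foldl_pyRange_pyGetD (xs.take m.toNat) d f init (a := 0) le_rfl
    rw [hlen] at hmain
    simp only [Int.toNat_zero, List.drop_zero] at hmain
    rw [← hmain]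
    apply PySem.List.foldl_congr_mem
    intro acc j hj
    obtain ⟨hj0, hjm⟩ := PySem.List.mem_pyRange_one.1 hj
    have hjt : j.toNat < (xs.take m.toNat).length := by
      simp only [List.length_take]; omega
    have hjx : j < (xs.length : Int) := by omega
    rw [PySem.List.pyGetD_eq_getElem xs d hj0 hjx,
        PySem.List.pyGetD_eq_getElem (xs.take m.toNat) d hj0 (by simp only [List.length_take]; omega)]
    rw [List.getElem_take]
  · have h1 : PySem.List.pyRange 0 m = [] := by
      rw [List.eq_nil_iff_forall_not_mem]
      intro x hx
      have := PySem.List.mem_pyRange_one.1 hx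
      omega
    have h2 : m.toNat = 0 := by omega
    simp [h1, h2]

-- PySem.Dict.erase lookup facts (no erase lemmas in the prelude).
theorem pv_get?_erase (d : PySem.Dict Int Int) (k v : Int) :
    (d.erase k).get? v = if v = k then none else d.get? v := by
  obtain ⟨items⟩ := d
  simp only [PySem.Dict.erase]
  induction items with
  | nil => simp [PySem.Dict.get?]
  | cons p rest ih =>
    rcases p with ⟨a, b⟩
    rw [List.filter_cons]
    by_cases hak : a = k
    · subst hak
      simp only [beq_self_eq_true, Bool.not_true, Bool.false_eq_true, if_false]
      rw [ih, PySem.Dict.get?_mk_cons]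
      by_cases hva : v = a
      · simp [hva]
      · simp [hva, show (a == v) = false by simp [Ne.symm hva]]
    · simp only [show (!(a == k)) = true by simp [hak], if_true]
      rw [PySem.Dict.get?_mk_cons, PySem.Dict.get?_mk_cons, ih]
      by_cases hva : v = k
      · subst hva
        simp [show (a == v) = false by simp [hak]]
      · simp only [if_neg hva]

theorem pv_getD_erase (d : PySem.Dict Int Int) (k v d0 : Int) :
    (d.erase k).getD v d0 = if v = k then d0 else d.getD v d0 := by
  rw [PySem.Dict.getD_eq_get?_getD, PySem.Dict.getD_eq_get?_getD, pv_get?_erase]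
  split_ifs <;> simp

theorem pv_contains_erase (d : PySem.Dict Int Int) (k v : Int) :
    (d.erase k).contains v = if v = k then false else d.contains v := by
  rw [PySem.Dict.contains_eq_isSome_get?, PySem.Dict.contains_eq_isSome_get?, pv_get?_erase]
  split_ifs <;> simp

-- A's scan simulated by the pure-function scan.
theorem pv_scanA_eq_scanF (xs : List Int) (mp : PySem.Dict Int Int) (L : Int) (f : Int → Int)
    (hc : ∀ v, mp.contains v = true ↔ f v ≠ 0)
    (hg : ∀ v, mp.getD v 0 = f v)
    (hpos : ∀ v, 0 ≤ f v) :
    (List.foldl pvAStep (mp, L) xs).2 = pvScanF xs f L := by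
  induction xs generalizing mp L f with
  | nil => rfl
  | cons x xs ih =>
    simp only [List.foldl_cons, pvScanF]
    by_cases hfx : f x ≠ 0
    · rw [if_pos hfx]
      have hcx : mp.contains x = true := (hc x).2 hfx
      have hfx1 : 1 ≤ f x := by have := hpos x; omega
      have hgx : mp.getD x 0 = f x := hg x
      by_cases hz : f x - 1 = 0
      · have hstep : pvAStep (mp, L) x = ((mp.insert x (f x - 1)).erase x, L) := by
          simp [pvAStep, hcx, hgx, PySem.Dict.getD_insert_self, hz]
        rw [hstep]
        apply ih
        · intro v
          rw [pv_contains_erase]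
          by_cases hvx : v = x
          · subst hvx; simp [hz]
          · simp only [if_neg hvx]
            rw [PySem.Dict.contains_insert]
            simp only [show (v == x) = false by simp [hvx], Bool.false_or]
            exact hc v
        · intro v
          rw [pv_getD_erase]
          by_cases hvx : v = x
          · subst hvx; simp [hz]
          · simp only [if_neg hvx]
            rw [PySem.Dict.getD_insert]
            simp only [if_neg hvx]
            exact hg v
        · intro v
          by_cases hvx : v = x
          · subst hvx; simp; omega
          · simp only [if_neg hvx]; exact hpos v
      · have hstep : pvAStep (mp, L) x = (mp.insert x (f x - 1), L) := by
          simp [pvAStep, hcx, hgx, PySem.Dict.getD_insert_self, hz]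
        rw [hstep]
        apply ih
        · intro v
          rw [PySem.Dict.contains_insert]
          by_cases hvx : v = x
          · subst hvx; simp [hz]
          · simp only [show (v == x) = false by simp [hvx], Bool.false_or, if_neg hvx]
            exact hc v
        · intro v
          rw [PySem.Dict.getD_insert]
          by_cases hvx : v = x
          · subst hvx; simp
          · simp only [if_neg hvx]; exact hg v
        · intro v
          by_cases hvx : v = x
          · subst hvx; simp; omega
          · simp only [if_neg hvx]; exact hpos v
    · rw [if_neg hfx]
      push Not at hfx
      have hcx : mp.contains x = false := by
        by_contra h
        have : mp.contains x = true := by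
          cases hcv : mp.contains x
          · exact absurd hcv h
          · rfl
        exact absurd (hfx) ((hc x).1 this)
      have hstep : pvAStep (mp, L) x = (mp, max L x) := by
        simp [pvAStep, hcx]
      rw [hstep]
      exact ih mp (max L x) f hc hg hpos

theorem pv_scanF_eq_foldl_max (xs : List Int) (f : Int → Int) (L : Int) :
    pvScanF xs f L = List.foldl max L (pvSurv xs f) := by
  induction xs generalizing f L with
  | nil => rfl
  | cons x xs ih =>
    simp only [pvScanF, pvSurv]
    by_cases hfx : f x ≠ 0
    · rw [if_pos hfx, if_pos hfx]
      exact ih _ _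
    · rw [if_neg hfx, if_neg hfx]
      rw [ih]
      simp [List.foldl_cons]

theorem pv_mem_surv (xs : List Int) (f : Int → Int) (hpos : ∀ v, 0 ≤ f v) (v : Int) :
    v ∈ pvSurv xs f ↔ v ∈ xs ∧ f v < (xs.count v : Int) := by
  induction xs generalizing f with
  | nil => simp [pvSurv]
  | cons x xs ih =>
    simp only [pvSurv]
    by_cases hfx : f x ≠ 0
    · rw [if_pos hfx]
      have hpos' : ∀ w, 0 ≤ (fun w => if w = x then f x - 1 else f w) w := by
        intro w
        by_cases hwx : w = x
        · subst hwx; simp only [if_true]; have := hpos w; omega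
        · simp only [if_neg hwx]; exact hpos w
      rw [ih _ hpos']
      by_cases hvx : v = x
      · subst hvx
        simp only [List.mem_cons, List.count_cons_self, true_or, true_and]
        push_cast
        constructor
        · rintro ⟨hm, hlt⟩; omega
        · rintro hlt
          have h1 : 1 ≤ f v := by have := hpos v; omega
          have h2 : 0 < List.count v xs := by omega
          exact ⟨List.count_pos_iff.1 h2, by omega⟩
      · simp only [if_neg hvx, List.mem_cons, List.count_cons]
        simp only [show (xs.count v + if x == v then 1 else 0) = xs.count v by
          simp [show (x == v) = false by simp [Ne.symm hvx]]]
        constructor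
        · rintro ⟨hm, hlt⟩; exact ⟨Or.inr hm, hlt⟩
        · rintro ⟨hm, hlt⟩
          rcases hm with hm | hm
          · exact absurd hm hvx
          · exact ⟨hm, hlt⟩
    · rw [if_neg hfx]
      push Not at hfx
      by_cases hvx : v = x
      · subst hvx
        constructor
        · intro _
          exact ⟨by simp, by rw [hfx, List.count_cons_self]; push_cast; omega⟩
        · intro _; simp
      · simp only [List.mem_cons, ih f hpos, List.count_cons,
          show (x == v) = false by simp [Ne.symm hvx], Bool.false_eq_true, if_false]
        simp only [hvx, false_or]
        constructor
        · rintro ⟨hm, hlt⟩; exact ⟨hm, by omega⟩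
        · rintro ⟨hm, hlt⟩; exact ⟨hm, by omega⟩

theorem pv_foldl_max_congr (xs ys : List Int) (L : Int) (h : ∀ v, v ∈ xs ↔ v ∈ ys) :
    List.foldl max L xs = List.foldl max L ys := by
  have h1 := PySem.List.le_foldl_max xs L
  have h2 := PySem.List.le_foldl_max ys L
  apply le_antisymm
  · rcases PySem.List.foldl_max_mem xs L with he | hm
    · rw [he]; exact h2.1
    · exact h2.2 _ ((h _).1 hm)
  · rcases PySem.List.foldl_max_mem ys L with he | hm
    · rw [he]; exact h1.1
    · exact h1.2 _ ((h _).2 hm)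

theorem pv_foldl_pairs (cd : PySem.Dict Int Int) (ps : List (Int × Int)) (L : Int) :
    List.foldl (fun best p => if cd.getD p.1 0 < p.2 then max best p.1 else best) L ps
      = List.foldl max L ((ps.filter (fun p => decide (cd.getD p.1 0 < p.2))).map Prod.fst) := by
  induction ps generalizing L with
  | nil => rfl
  | cons p ps ih =>
    simp only [List.foldl_cons, List.filter_cons]
    by_cases hp : cd.getD p.1 0 < p.2
    · rw [if_pos hp, ih]
      simp [hp]
    · rw [if_neg hp, ih]
      simp [hp]

-- ===== VERDICT (by name: the statement is the Claim_ definition above) =====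
theorem findlargestAfterDel_spec : Claim_equal_findlargestAfterDel := by
  intro arr m dell n _ hpre
  obtain ⟨hm, hn⟩ := hpre
  unfold Spec_findlargestAfterDel
  have hdell : List.foldl (fun mp i => pvDStep mp (PySem.List.pyGetD dell i 0))
      PySem.Dict.empty (PySem.List.pyRange 0 n) = PySem.Dict.counter (dell.take n.toNat) := by
    rw [pv_foldl_pyRange_take dell 0 pvDStep PySem.Dict.empty n hn]
    rw [PySem.List.foldl_congr_mem _ pvDStep (fun d x => d.insert x (d.getD x 0 + 1)) _ ?_]
    · exact PySem.Dict.foldl_insert_getD_add_one_eq_counter _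
    · intro acc x _
      unfold pvDStep
      cases hca : acc.contains x
      · simp only [Bool.false_eq_true, if_false]
        rw [PySem.Dict.getD_of_not_contains acc 0 hca]
        norm_num
      · simp
  have hAside : findlargestAfterDel arr m dell n
      = (List.foldl pvAStep (PySem.Dict.counter (dell.take n.toNat), -(10 ^ 9)) (arr.take m.toNat)).2 := by
    show (List.foldl (fun st i => pvAStep st (PySem.List.pyGetD arr i 0))
        (List.foldl (fun mp i => pvDStep mp (PySem.List.pyGetD dell i 0)) PySem.Dict.empty
          (PySem.List.pyRange 0 n), -(10 ^ 9))
        (PySem.List.pyRange 0 m)).2 = _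
    rw [hdell, pv_foldl_pyRange_take arr 0 pvAStep _ m hm]
  have hc : ∀ v, (PySem.Dict.counter (dell.take n.toNat)).contains v = true
      ↔ (fun v => ((dell.take n.toNat).count v : Int)) v ≠ 0 := by
    intro v
    rw [PySem.Dict.contains_counter]
    constructor
    · intro hmem
      have hv : v ∈ dell.take n.toNat := by simpa using hmem
      have := List.count_pos_iff.2 hv
      simp only [ne_eq]
      omega
    · intro hne
      have hpos : 0 < List.count v (dell.take n.toNat) := by
        by_contra h
        have h0 : List.count v (dell.take n.toNat) = 0 := by omega
        apply hne
        simp [h0]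
      simpa using List.count_pos_iff.1 hpos
  have hg : ∀ v, (PySem.Dict.counter (dell.take n.toNat)).getD v 0
      = (fun v => ((dell.take n.toNat).count v : Int)) v :=
    fun v => PySem.Dict.getD_counter _ v
  have hposf : ∀ v, 0 ≤ (fun v => ((dell.take n.toNat).count v : Int)) v := by
    intro v; positivity
  rw [hAside, pv_scanA_eq_scanF _ _ _ _ hc hg hposf, pv_scanF_eq_foldl_max]
  have hca : List.foldl (fun d i => pvCStep d (PySem.List.pyGetD arr i 0))
      PySem.Dict.empty (PySem.List.pyRange 0 m) = PySem.Dict.counter (arr.take m.toNat) := by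
    rw [pv_foldl_pyRange_take arr 0 pvCStep PySem.Dict.empty m hm]
    exact PySem.Dict.foldl_insert_getD_add_one_eq_counter _
  have hcd : List.foldl (fun d i => pvCStep d (PySem.List.pyGetD dell i 0))
      PySem.Dict.empty (PySem.List.pyRange 0 n) = PySem.Dict.counter (dell.take n.toNat) := by
    rw [pv_foldl_pyRange_take dell 0 pvCStep PySem.Dict.empty n hn]
    exact PySem.Dict.foldl_insert_getD_add_one_eq_counter _
  have hBside : findlargestAfterDel_alt arr m dell n
      = List.foldl
          (fun best p => if (PySem.Dict.counter (dell.take n.toNat)).getD p.1 0 < p.2 then max best p.1 else best)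
          (-(10 ^ 9)) (PySem.Dict.counter (arr.take m.toNat)).items := by
    show List.foldl
        (fun best p =>
          if (List.foldl (fun d i => pvCStep d (PySem.List.pyGetD dell i 0)) PySem.Dict.empty
              (PySem.List.pyRange 0 n)).getD p.1 0 < p.2 then max best p.1 else best)
        (-(10 ^ 9))
        (List.foldl (fun d i => pvCStep d (PySem.List.pyGetD arr i 0)) PySem.Dict.empty
          (PySem.List.pyRange 0 m)).items = _
    rw [hca, hcd]
  rw [hBside, pv_foldl_pairs]
  apply pv_foldl_max_congr
  intro v
  rw [pv_mem_surv _ _ hposf v]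
  constructor
  · rintro ⟨hmem, hlt⟩
    refine List.mem_map.2 ⟨(v, ((arr.take m.toNat).count v : Int)), ?_, rfl⟩
    rw [List.mem_filter]
    refine ⟨?_, ?_⟩
    · rw [PySem.Dict.items_counter]
      exact List.mem_map.2 ⟨v, (PySem.Set.mem_ofList _ _).2 hmem, rfl⟩
    · rw [decide_eq_true_eq, PySem.Dict.getD_counter]
      exact hlt
  · intro hmem
    obtain ⟨p, hpmem, hpv⟩ := List.mem_map.1 hmem
    rw [List.mem_filter] at hpmem
    obtain ⟨hpi, hpq⟩ := hpmem
    rw [PySem.Dict.items_counter] at hpi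
    obtain ⟨k, hk, hkp⟩ := List.mem_map.1 hpi
    subst hkp
    cases hpv
    refine ⟨(PySem.Set.mem_ofList _ _).1 hk, ?_⟩
    rw [decide_eq_true_eq, PySem.Dict.getD_counter] at hpq
    exact hpq
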